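-- pv_equiv track=rewrite | github.com/jq728/cs101-2024 | 提取实体v0.3 (string).py | count_entities
-- ===== SOURCE A (Python) =====
-- def count_entities(sentences):
--     entity_count = 0
--     for sentence in sentences:
--         words = sentence.split()
--         i = 0
--         while i < len(words):
--             if words[i].startswith("###") and words[i].endswith("###"):
--                 entity_count += 1
--                 while i < len(words) and words[i].startswith("###") and words[i].endswith("###"):
--                     i += 1
--             else:
--                 i += 1
--     return entity_count
-- ===== SOURCE B (Python) =====
-- def count_entities(sentences):
--     total = 0
--     for sentence in sentences:
--         # stage 1: run-length collapse the entity flags (groupby-style)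
--         collapsed = []
--         for f in (w.startswith("###") and w.endswith("###") for w in sentence.split()):
--             if not collapsed or collapsed[-1] != f:
--                 collapsed.append(f)
--         # stage 2: each True in the collapsed list is one maximal entity run
--         total += collapsed.count(True)
--     return total
-- ===== Notes on version B (the rewrite author's own statement) =====
-- stated objective: alternative
-- what changed: Instead of A's nested while loops that skip over an entity run after counting it, B run-length-collapses each sentence's flag sequence into its groupby-style list of distinct consecutive flags and then counts the True entries, each of which is one maximal run.
import Mathlib
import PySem

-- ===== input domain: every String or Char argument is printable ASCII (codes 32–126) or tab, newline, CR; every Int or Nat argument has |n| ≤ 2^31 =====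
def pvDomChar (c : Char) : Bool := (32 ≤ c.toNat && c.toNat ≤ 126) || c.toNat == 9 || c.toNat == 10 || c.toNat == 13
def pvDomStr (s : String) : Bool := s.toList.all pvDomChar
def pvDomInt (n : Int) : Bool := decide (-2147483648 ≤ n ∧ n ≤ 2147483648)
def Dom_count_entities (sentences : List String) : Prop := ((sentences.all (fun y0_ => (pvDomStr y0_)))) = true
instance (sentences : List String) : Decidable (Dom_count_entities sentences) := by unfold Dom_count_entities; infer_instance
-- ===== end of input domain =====

-- B replaces A's nested index-skipping while loops by two stages per sentence: run-length
-- collapse the flag sequence (groupby-style), then count the True entries (objective: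
-- alternative; same cost).

-- ===== PORT A =====
-- words[i].startswith("###") and words[i].endswith("###")
def isEntA (w : String) : Bool := PySem.Str.startswith w "###" && PySem.Str.endswith w "###"

-- the inner 'while i < len(words) and entity: i += 1' as a recursion on the suffix
def aSkip : List String → List String
  | [] => []
  | w :: ws => if isEntA w then aSkip ws else w :: ws

theorem aSkip_length_le : ∀ (ws : List String), (aSkip ws).length ≤ ws.length
  | [] => le_refl _
  | w :: ws => by
      simp only [aSkip]
      split
      · exact le_trans (aSkip_length_le ws) (Nat.le_succ _)
      · exact le_refl _

-- the outer 'while i < len(words)' as a recursion on the suffix of words at index i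
def aOuter : List String → Int → Int
  | [], acc => acc
  | w :: ws, acc =>
      if isEntA w then aOuter (aSkip ws) (acc + 1) else aOuter ws acc
termination_by ws _ => ws.length
decreasing_by
  · exact Nat.lt_succ_of_le (aSkip_length_le ws)
  · simp

def count_entities (sentences : List String) : Int :=
  sentences.foldl (fun acc s => aOuter (PySem.Str.split₀ s) acc) 0

-- ===== PORT B =====
def isEntB (w : String) : Bool := PySem.Str.startswith w "###" && PySem.Str.endswith w "###"

-- 'if not collapsed or collapsed[-1] != f: collapsed.append(f)'
def bStep (acc : List Bool) (f : Bool) : List Bool :=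
  if acc.isEmpty || !(acc.getLast? == some f) then acc ++ [f] else acc

def count_entities_alt (sentences : List String) : Int :=
  sentences.foldl
    (fun total s =>
      let collapsed := ((PySem.Str.split₀ s).map isEntB).foldl bStep []
      total + (PySem.List.count collapsed true : Int))
    0

-- ===== PRECONDITION & SPEC =====
def Spec_count_entities (sentences : List String) (out : Int) : Prop := out = count_entities_alt sentences
instance (sentences : List String) (out : Int) : Decidable (Spec_count_entities sentences out) := by unfold Spec_count_entities; infer_instance

-- ===== CLAIM (what is proved, stated in full; the proofs are below) =====
def Claim_equal_count_entities : Prop := ∀ (sentences : List String), Dom_count_entities sentences → Spec_count_entities sentences (count_entities sentences)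

-- ===== LEMMAS AND PROOFS =====

-- number of maximal True runs in a flag list, given the previous flag
def edges : Bool → List Bool → Int
  | _, [] => 0
  | prev, f :: fs => (if f && !prev then 1 else 0) + edges f fs

theorem aOuter_edges : ∀ (ws : List String) (acc : Int),
    aOuter ws acc = acc + edges false (ws.map isEntA) ∧
    aOuter (aSkip ws) acc = acc + edges true (ws.map isEntA) := by
  intro ws
  induction ws with
  | nil => intro acc; simp [aOuter, aSkip, edges]
  | cons w ws ih =>
      intro acc
      cases hE : isEntA w
      · refine ⟨?_, ?_⟩
        · rw [show aOuter (w :: ws) acc = aOuter ws acc from by simp [aOuter, hE]]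
          rw [(ih acc).1]; simp [edges, List.map_cons, hE]
        · rw [show aSkip (w :: ws) = w :: ws from by simp [aSkip, hE]]
          rw [show aOuter (w :: ws) acc = aOuter ws acc from by simp [aOuter, hE]]
          rw [(ih acc).1]; simp [edges, List.map_cons, hE]
      · refine ⟨?_, ?_⟩
        · rw [show aOuter (w :: ws) acc = aOuter (aSkip ws) (acc + 1) from by simp [aOuter, hE]]
          rw [(ih (acc + 1)).2]; simp [edges, List.map_cons, hE]; ring
        · rw [show aSkip (w :: ws) = aSkip ws from by simp [aSkip, hE]]
          rw [(ih acc).2]; simp [edges, List.map_cons, hE]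

-- the collapse fold counts exactly the rising edges relative to the accumulator's last flag
theorem collapse_count : ∀ (fs : List Bool) (acc : List Bool),
    ((fs.foldl bStep acc).count true : Int) = (acc.count true : Int) + edges (acc.getLastD false) fs := by
  intro fs
  induction fs with
  | nil => intro acc; simp [edges]
  | cons f fs ih =>
      intro acc
      simp only [List.foldl_cons]
      by_cases h : (acc.isEmpty || !(acc.getLast? == some f)) = true
      · rw [show bStep acc f = acc ++ [f] from by simp [bStep, h]]
        rw [ih]
        have hlast : (acc ++ [f]).getLastD false = f := by
          simp [List.getLastD_eq_getLast?]
        rw [hlast]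
        have hp : (if f && !(acc.getLastD false) then (1 : Int) else 0) = (if f then 1 else 0) := by
          cases hf : f
          · simp
          · have hz : acc.getLastD false = false := by
              cases hg : acc.getLast? with
              | none => simp [List.getLastD_eq_getLast?, hg]
              | some b =>
                rcases Bool.or_eq_true_iff.mp h with he | hne
                · rw [List.isEmpty_iff.mp he] at hg; simp at hg
                · rw [hf, hg] at hne
                  cases b
                  · simp [List.getLastD_eq_getLast?, hg]
                  · simp at hne
            rw [hz]; simp
        simp only [edges]
        rw [hp]
        push_cast [List.count_append]
        cases f
        · simp
        · simp; ring
      · rw [show bStep acc f = acc from by simp [bStep, h]]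
        rw [ih]
        have h2 : acc.getLast? = some f := by
          by_contra hc
          exact h (by simp [hc])
        have hlast : acc.getLastD false = f := by
          simp [List.getLastD_eq_getLast?, h2]
        simp only [edges, hlast]
        simp

theorem folds_eq : ∀ (l : List String) (acc : Int),
    l.foldl (fun acc s => aOuter (PySem.Str.split₀ s) acc) acc =
    l.foldl (fun total s =>
      let collapsed := ((PySem.Str.split₀ s).map isEntB).foldl bStep []
      total + (PySem.List.count collapsed true : Int)) acc := by
  intro l
  induction l with
  | nil => intro acc; rfl
  | cons s l ih =>
      intro acc
      simp only [List.foldl_cons]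
      rw [ih, (aOuter_edges (PySem.Str.split₀ s) acc).1]
      have : isEntB = isEntA := rfl
      rw [this]
      show _ = l.foldl _ (acc + (PySem.List.count (((PySem.Str.split₀ s).map isEntA).foldl bStep []) true : Int))
      rw [show PySem.List.count (((PySem.Str.split₀ s).map isEntA).foldl bStep []) true
            = (((PySem.Str.split₀ s).map isEntA).foldl bStep []).count true from rfl]
      rw [collapse_count]
      simp

-- ===== VERDICT (by name: the statement is the Claim_ definition above) =====
theorem count_entities_spec : Claim_equal_count_entities := by
  intro sentences _
  unfold Spec_count_entities count_entities count_entities_alt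
  exact folds_eq sentences 0
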